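-- pv_equiv track=rewrite | github.com/JingkaiSHI/WangAgent | submission_agent/my_player3.py | violates_ko
-- ===== SOURCE A (Python) =====
-- X_TYPE = 1
--
-- O_TYPE = 2
--
-- def get_group(board, i, j, player):
--     """
--     Returns all coordinates belonging to the connected group of stones for the given player starting at (i, j).
--     """
--     group = []
--     stack = [(i, j)]
--     visited = set()
--     while stack:
--         x, y = stack.pop()
--         if (x, y) in visited:
--             continue
--         visited.add((x, y))
--         group.append((x, y))
--         for dx, dy in [(-1, 0), (1, 0), (0, -1), (0, 1)]:
--             nx, ny = x + dx, y + dy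
--             if 0 <= nx < len(board) and 0 <= ny < len(board[0]):
--                 if board[nx][ny] == player and (nx, ny) not in visited:
--                     stack.append((nx, ny))
--     return group
--
-- def count_liberties(board, i, j, player):
--     """
--     Count unique liberties (empty adjacent cells) for the group at position (i, j) belonging to player.
--     """
--     if board[i][j] != player:
--         return 0
--
--     visited = set()
--     liberties = set()
--     stack = [(i, j)]
--     directions = [(-1, 0), (1, 0), (0, -1), (0, 1)]
--
--     while stack:
--         x, y = stack.pop()
--         if (x, y) in visited:
--             continue
--         visited.add((x, y))
--         for dx, dy in directions:
--             nx, ny = x + dx, y + dy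
--             if 0 <= nx < len(board) and 0 <= ny < len(board[0]):
--                 if board[nx][ny] == 0:
--                     liberties.add((nx, ny))
--                 elif board[nx][ny] == player and (nx, ny) not in visited:
--                     stack.append((nx, ny))
--     return len(liberties)
--
-- def violates_ko(current_board, prev_board, move, player):
--     """
--     Examine if placing a stone at 'move' violates the KO rule by simulating the move.
--     The simulation includes:
--       - Placing the stone.
--       - Removing any adjacent opponent groups with no liberties (i.e., captures).
--     If the resulting board is identical to prev_board, then the move violates KO.
--
--     :param current_board: 2D list representing the current board.
--     :param prev_board: 2D list representing the board from one move ago.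
--     :param move: A tuple (i, j) representing the move, or "PASS".
--     :param player: The current player's piece type.
--     :return: True if the move violates KO, otherwise False.
--     """
--     if move == "PASS":
--         return False
--
--     i, j = move
--     # Create a deep copy of the current board.
--     new_board = [row.copy() for row in current_board]
--     # Place the stone.
--     new_board[i][j] = player
--
--     # Determine the opponent's piece type.
--     opponent = X_TYPE if player == O_TYPE else O_TYPE
--
--     # For each adjacent cell, check if it belongs to an opponent group that should be captured.
--     directions = [(-1, 0), (1, 0), (0, 1), (0, -1)]
--     for dx, dy in directions:
--         nx, ny = i + dx, j + dy
--         if 0 <= nx < len(new_board) and 0 <= ny < len(new_board[0]):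
--             if new_board[nx][ny] == opponent:
--                 # If this opponent group has no liberties, capture it.
--                 if count_liberties(new_board, nx, ny, opponent) == 0:
--                     group = get_group(new_board, nx, ny, opponent)
--                     for (gx, gy) in group:
--                         new_board[gx][gy] = 0
--
--     # Compare the resulting board to the previous board.
--     return new_board == prev_board
-- ===== SOURCE B (Python) =====
-- X_TYPE = 1
-- O_TYPE = 2
--
-- def violates_ko(current_board, prev_board, move, player):
--     """Simulate the move with a single fused flood fill per neighbor group and
--     compare the resulting board with prev_board."""
--     if move == "PASS":
--         return False
--     i, j = move
--     board = [row[:] for row in current_board]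
--     board[i][j] = player
--     opponent = X_TYPE if player == O_TYPE else O_TYPE
--     rows, cols = len(board), len(board[0])
--     for nx, ny in ((i - 1, j), (i + 1, j), (i, j + 1), (i, j - 1)):
--         if 0 <= nx < rows and 0 <= ny < cols and board[nx][ny] == opponent:
--             # one pass: collect the group and note whether it has any liberty
--             group, alive = [], False
--             seen = set()
--             stack = [(nx, ny)]
--             while stack:
--                 x, y = stack.pop()
--                 if (x, y) in seen:
--                     continue
--                 seen.add((x, y))
--                 group.append((x, y))
--                 for ax, ay in ((x - 1, y), (x + 1, y), (x, y - 1), (x, y + 1)):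
--                     if 0 <= ax < rows and 0 <= ay < cols:
--                         if board[ax][ay] == 0:
--                             alive = True
--                         elif board[ax][ay] == opponent and (ax, ay) not in seen:
--                             stack.append((ax, ay))
--             if not alive:
--                 for gx, gy in group:
--                     board[gx][gy] = 0
--     return board == prev_board
-- ===== Notes on version B (the rewrite author's own statement) =====
-- stated objective: simpler
-- what changed: A runs two separate stack-based flood fills per neighbor (count_liberties to build the liberty set, then get_group to re-traverse and collect the group); B runs one fused flood fill per neighbor that collects the group and a has-liberty boolean flag in a single pass, with no helper functions and no liberty set.
-- outside the precondition, e.g. on violates_ko([[0], [0, 0]], [[0], [0, 0]], (0, 0), 1): A returns False, B returns False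
import Mathlib
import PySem

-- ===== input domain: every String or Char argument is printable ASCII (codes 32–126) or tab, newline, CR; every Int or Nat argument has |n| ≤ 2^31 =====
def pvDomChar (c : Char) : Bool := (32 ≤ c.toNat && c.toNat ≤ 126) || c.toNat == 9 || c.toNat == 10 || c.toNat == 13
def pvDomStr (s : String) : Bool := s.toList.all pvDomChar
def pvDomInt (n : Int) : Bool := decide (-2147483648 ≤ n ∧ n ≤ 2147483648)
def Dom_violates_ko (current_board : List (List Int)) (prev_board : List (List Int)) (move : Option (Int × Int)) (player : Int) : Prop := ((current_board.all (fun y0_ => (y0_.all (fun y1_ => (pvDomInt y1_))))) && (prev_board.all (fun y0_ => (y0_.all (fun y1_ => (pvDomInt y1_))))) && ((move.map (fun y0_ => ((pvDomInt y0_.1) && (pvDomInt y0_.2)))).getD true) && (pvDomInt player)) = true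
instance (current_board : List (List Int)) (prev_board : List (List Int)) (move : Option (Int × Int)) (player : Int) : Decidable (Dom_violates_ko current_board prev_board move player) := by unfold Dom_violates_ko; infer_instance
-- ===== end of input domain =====

-- B replaces A's two flood fills per neighbor (liberty count + group collection) by one
-- fused flood fill that collects the group and a has-liberty flag in a single pass (objective: simpler).
-- Both Pythons mutate only their private board copy; the proved equivalence is about the return value.

-- board[x][y] with a default (all real accesses are guarded in range by the code)
def pvGet (b : List (List Int)) (x y : Int) : Int :=
  PySem.List.pyGetD (PySem.List.pyGetD b x []) y 0

-- board[x][y] = v  (Python semantics: the row read at x is the row replaced at x)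
def pvPlace (b : List (List Int)) (x y v : Int) : List (List Int) :=
  PySem.List.pySetD b x (PySem.List.pySetD (PySem.List.pyGetD b x []) y v)

-- fuel bound for the while loops (every loop performs at most 5*rows*cols+1 iterations)
def pvFuel (b : List (List Int)) : Nat :=
  5 * (b.length * (PySem.List.pyGetD b 0 []).length) + 5

-- ===== PORT A =====
def pvDirs : List (Int × Int) := [(-1, 0), (1, 0), (0, -1), (0, 1)]

-- body of count_liberties' inner 'for dx, dy in directions' loop
def clStep (b : List (List Int)) (p : Int) (visited : PySem.Set (Int × Int)) (x y : Int)
    (s : List (Int × Int) × PySem.Set (Int × Int)) (d : Int × Int) :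
    List (Int × Int) × PySem.Set (Int × Int) :=
  let nx := x + d.1
  let ny := y + d.2
  if 0 ≤ nx ∧ nx < (b.length : Int) ∧ 0 ≤ ny ∧ ny < ((PySem.List.pyGetD b 0 []).length : Int) then
    if pvGet b nx ny = 0 then (s.1, PySem.Set.add s.2 (nx, ny))
    else if pvGet b nx ny = p ∧ (nx, ny) ∉ visited then ((nx, ny) :: s.1, s.2) else s
  else s

-- count_liberties' while loop (stack top at the head)
def clLoop (b : List (List Int)) (p : Int) :
    Nat → List (Int × Int) → PySem.Set (Int × Int) → PySem.Set (Int × Int) → PySem.Set (Int × Int)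
  | 0, _, _, libs => libs
  | _ + 1, [], _, libs => libs
  | f + 1, (x, y) :: rest, visited, libs =>
    if (x, y) ∈ visited then clLoop b p f rest visited libs
    else
      let visited' := PySem.Set.add visited (x, y)
      let s := pvDirs.foldl (clStep b p visited' x y) (rest, libs)
      clLoop b p f s.1 visited' s.2

def count_liberties (b : List (List Int)) (i j p : Int) : Int :=
  if pvGet b i j ≠ p then 0
  else ((clLoop b p (pvFuel b) [(i, j)] PySem.Set.empty PySem.Set.empty).length : Int)

-- body of get_group's inner neighbour loop
def gStep (b : List (List Int)) (p : Int) (visited : PySem.Set (Int × Int)) (x y : Int)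
    (s : List (Int × Int)) (d : Int × Int) : List (Int × Int) :=
  let nx := x + d.1
  let ny := y + d.2
  if 0 ≤ nx ∧ nx < (b.length : Int) ∧ 0 ≤ ny ∧ ny < ((PySem.List.pyGetD b 0 []).length : Int) then
    if pvGet b nx ny = p ∧ (nx, ny) ∉ visited then (nx, ny) :: s else s
  else s

-- get_group's while loop
def gLoop (b : List (List Int)) (p : Int) :
    Nat → List (Int × Int) → PySem.Set (Int × Int) → List (Int × Int) → List (Int × Int)
  | 0, _, _, group => group
  | _ + 1, [], _, group => group
  | f + 1, (x, y) :: rest, visited, group =>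
    if (x, y) ∈ visited then gLoop b p f rest visited group
    else
      let visited' := PySem.Set.add visited (x, y)
      let s := pvDirs.foldl (gStep b p visited' x y) rest
      gLoop b p f s visited' (group ++ [(x, y)])

def get_group (b : List (List Int)) (i j p : Int) : List (Int × Int) :=
  gLoop b p (pvFuel b) [(i, j)] PySem.Set.empty []

def pvOuterDirs : List (Int × Int) := [(-1, 0), (1, 0), (0, 1), (0, -1)]

-- body of A's 'for dx, dy in directions' capture loop
def stepA (i j opp : Int) (nb : List (List Int)) (d : Int × Int) : List (List Int) :=
  let nx := i + d.1
  let ny := j + d.2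
  if 0 ≤ nx ∧ nx < (nb.length : Int) ∧ 0 ≤ ny ∧ ny < ((PySem.List.pyGetD nb 0 []).length : Int) then
    if pvGet nb nx ny = opp then
      if count_liberties nb nx ny opp = 0 then
        (get_group nb nx ny opp).foldl (fun bb c => pvPlace bb c.1 c.2 0) nb
      else nb
    else nb
  else nb

def violates_ko (current_board : List (List Int)) (prev_board : List (List Int)) (move : Option (Int × Int)) (player : Int) : Bool :=
  match move with
  | none => false
  | some (i, j) =>
    let nb0 := pvPlace current_board i j player
    let opp : Int := if player = 2 then 1 else 2
    let nb := pvOuterDirs.foldl (stepA i j opp) nb0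
    decide (nb = prev_board)

-- ===== PORT B =====
-- body of B's fused flood fill's neighbour loop (q is the neighbour coordinate itself)
def floodStep (b : List (List Int)) (p R C : Int) (seen : PySem.Set (Int × Int))
    (s : List (Int × Int) × Bool) (q : Int × Int) : List (Int × Int) × Bool :=
  if 0 ≤ q.1 ∧ q.1 < R ∧ 0 ≤ q.2 ∧ q.2 < C then
    if pvGet b q.1 q.2 = 0 then (s.1, true)
    else if pvGet b q.1 q.2 = p ∧ q ∉ seen then (q :: s.1, s.2) else s
  else s

-- B's single while loop: collects the group and whether any liberty was seen
def floodLoop (b : List (List Int)) (p R C : Int) :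
    Nat → List (Int × Int) → PySem.Set (Int × Int) → List (Int × Int) → Bool →
    List (Int × Int) × Bool
  | 0, _, _, group, alive => (group, alive)
  | _ + 1, [], _, group, alive => (group, alive)
  | f + 1, (x, y) :: rest, seen, group, alive =>
    if (x, y) ∈ seen then floodLoop b p R C f rest seen group alive
    else
      let seen' := PySem.Set.add seen (x, y)
      let s := [(x - 1, y), (x + 1, y), (x, y - 1), (x, y + 1)].foldl
                 (floodStep b p R C seen') (rest, alive)
      floodLoop b p R C f s.1 seen' (group ++ [(x, y)]) s.2

-- body of B's 'for nx, ny in neighbours' loop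
def stepB (opp R C : Int) (nb : List (List Int)) (q : Int × Int) : List (List Int) :=
  if 0 ≤ q.1 ∧ q.1 < R ∧ 0 ≤ q.2 ∧ q.2 < C then
    if pvGet nb q.1 q.2 = opp then
      let r := floodLoop nb opp R C (pvFuel nb) [q] PySem.Set.empty [] false
      if r.2 = false then r.1.foldl (fun bb c => pvPlace bb c.1 c.2 0) nb else nb
    else nb
  else nb

def violates_ko_alt (current_board : List (List Int)) (prev_board : List (List Int)) (move : Option (Int × Int)) (player : Int) : Bool :=
  match move with
  | none => false
  | some (i, j) =>
    let board := pvPlace current_board i j player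
    let opp : Int := if player = 2 then 1 else 2
    let R : Int := board.length
    let C : Int := (PySem.List.pyGetD board 0 []).length
    let fin := [(i - 1, j), (i + 1, j), (i, j + 1), (i, j - 1)].foldl (stepB opp R C) board
    decide (fin = prev_board)

-- ===== PRECONDITION & SPEC =====
-- Pre_ excludes inputs where Python A raises (move=None → TypeError; an out-of-range move or an
-- empty board → IndexError) and restricts to rectangular boards, the natural Go domain: on a
-- ragged board per-row indexing may raise IndexError mid-flood and its behaviour is accidental.
def Pre_violates_ko (current_board : List (List Int)) (prev_board : List (List Int)) (move : Option (Int × Int)) (player : Int) : Prop :=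
  move ≠ none ∧ current_board ≠ [] ∧
  (∀ row ∈ current_board, row.length = (PySem.List.pyGetD current_board 0 []).length) ∧
  -(current_board.length : Int) ≤ (move.getD (0, 0)).1 ∧
  (move.getD (0, 0)).1 < (current_board.length : Int) ∧
  -((PySem.List.pyGetD current_board 0 []).length : Int) ≤ (move.getD (0, 0)).2 ∧
  (move.getD (0, 0)).2 < ((PySem.List.pyGetD current_board 0 []).length : Int)
instance (current_board : List (List Int)) (prev_board : List (List Int)) (move : Option (Int × Int)) (player : Int) : Decidable (Pre_violates_ko current_board prev_board move player) := by unfold Pre_violates_ko; infer_instance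

def pvWitness_violates_ko : List (List Int) × List (List Int) × (Option (Int × Int)) × Int :=
  ([[0, 1], [1, 0]], [[0, 1], [1, 0]], some (0, 0), 2)

def Spec_violates_ko (current_board : List (List Int)) (prev_board : List (List Int)) (move : Option (Int × Int)) (player : Int) (out : Bool) : Prop := out = violates_ko_alt current_board prev_board move player
instance (current_board : List (List Int)) (prev_board : List (List Int)) (move : Option (Int × Int)) (player : Int) (out : Bool) : Decidable (Spec_violates_ko current_board prev_board move player out) := by unfold Spec_violates_ko; infer_instance

-- ===== CLAIM (what is proved, stated in full; the proofs are below) =====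
def Claim_equal_violates_ko : Prop := ∀ (current_board : List (List Int)) (prev_board : List (List Int)) (move : Option (Int × Int)) (player : Int), Dom_violates_ko current_board prev_board move player → Pre_violates_ko current_board prev_board move player → Spec_violates_ko current_board prev_board move player (violates_ko current_board prev_board move player)

-- ===== LEMMAS AND PROOFS =====

lemma isEmpty_add (s : PySem.Set (Int × Int)) (c : Int × Int) :
    (PySem.Set.add s c).isEmpty = false := by
  rw [PySem.Set.add_eq_ite]
  split
  · rename_i h; cases s with
    | nil => cases h
    | cons a t => simp
  · simp

-- one neighbour step: B's fused step corresponds to A's two steps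
lemma step1 (b : List (List Int)) (p : Int) (hp : p ≠ 0) (visited : PySem.Set (Int × Int))
    (x y : Int) (d : Int × Int) (st : List (Int × Int)) (libs : PySem.Set (Int × Int)) :
    floodStep b p (b.length : Int) ((PySem.List.pyGetD b 0 []).length : Int) visited
        (st, !libs.isEmpty) (x + d.1, y + d.2) =
      ((clStep b p visited x y (st, libs) d).1, !(clStep b p visited x y (st, libs) d).2.isEmpty)
    ∧ (clStep b p visited x y (st, libs) d).1 = gStep b p visited x y st d := by
  unfold floodStep clStep gStep
  by_cases hr : 0 ≤ x + d.1 ∧ x + d.1 < (b.length : Int) ∧ 0 ≤ y + d.2 ∧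
      y + d.2 < ((PySem.List.pyGetD b 0 []).length : Int)
  · simp only [hr]
    by_cases h0 : pvGet b (x + d.1) (y + d.2) = 0
    · have hnp : ¬ (pvGet b (x + d.1) (y + d.2) = p ∧ (x + d.1, y + d.2) ∉ visited) := by
        intro hc; exact hp (by rw [← hc.1, h0])
      simp [h0, Ne.symm hp, isEmpty_add]
    · by_cases h1 : pvGet b (x + d.1) (y + d.2) = p ∧ (x + d.1, y + d.2) ∉ visited
      · simp [h1, hp]
      · simp [h0, h1]
  · simp [hr]

-- the full neighbour fold, for the literal 4-direction lists
lemma fold1 (b : List (List Int)) (p : Int) (hp : p ≠ 0) (visited : PySem.Set (Int × Int))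
    (x y : Int) (st : List (Int × Int)) (libs : PySem.Set (Int × Int)) :
    ([(x - 1, y), (x + 1, y), (x, y - 1), (x, y + 1)].foldl
        (floodStep b p (b.length : Int) ((PySem.List.pyGetD b 0 []).length : Int) visited)
        (st, !libs.isEmpty) =
      ((pvDirs.foldl (clStep b p visited x y) (st, libs)).1,
        !(pvDirs.foldl (clStep b p visited x y) (st, libs)).2.isEmpty))
    ∧ (pvDirs.foldl (clStep b p visited x y) (st, libs)).1 =
        pvDirs.foldl (gStep b p visited x y) st := by
  simp only [pvDirs, List.foldl_cons, List.foldl_nil, sub_eq_add_neg]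
  have a1 := step1 b p hp visited x y (-1, 0) st libs
  norm_num at a1
  obtain ⟨a1, c1⟩ := a1
  set cl1 := clStep b p visited x y (st, libs) (-1, 0) with hcl1
  have a2 := step1 b p hp visited x y (1, 0) cl1.1 cl1.2
  norm_num [Prod.mk.eta] at a2
  obtain ⟨a2, c2⟩ := a2
  set cl2 := clStep b p visited x y cl1 (1, 0) with hcl2
  have a3 := step1 b p hp visited x y (0, -1) cl2.1 cl2.2
  norm_num [Prod.mk.eta] at a3
  obtain ⟨a3, c3⟩ := a3
  set cl3 := clStep b p visited x y cl2 (0, -1) with hcl3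
  have a4 := step1 b p hp visited x y (0, 1) cl3.1 cl3.2
  norm_num [Prod.mk.eta] at a4
  obtain ⟨a4, c4⟩ := a4
  set cl4 := clStep b p visited x y cl3 (0, 1) with hcl4
  refine ⟨?_, ?_⟩
  · rw [a1, a2, a3, a4]
  · rw [c4, c3, c2, c1]

lemma flood_eq (b : List (List Int)) (p : Int) (hp : p ≠ 0) :
    ∀ (f : Nat) (stack : List (Int × Int)) (visited : PySem.Set (Int × Int))
      (group : List (Int × Int)) (libs : PySem.Set (Int × Int)),
      floodLoop b p (b.length : Int) ((PySem.List.pyGetD b 0 []).length : Int)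
          f stack visited group (!libs.isEmpty) =
        (gLoop b p f stack visited group, !(clLoop b p f stack visited libs).isEmpty) := by
  intro f
  induction f with
  | zero => intro stack visited group libs; rfl
  | succ f ih =>
    intro stack visited group libs
    cases stack with
    | nil => rfl
    | cons c rest =>
      obtain ⟨x, y⟩ := c
      by_cases hv : (x, y) ∈ visited
      · simp only [floodLoop, gLoop, clLoop, hv, if_true]
        exact ih rest visited group libs
      · simp only [floodLoop, gLoop, clLoop, hv, if_false]
        obtain ⟨h1, h2⟩ := fold1 b p hp (PySem.Set.add visited (x, y)) x y rest libs
        rw [h1, h2]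
        exact ih _ _ _ _

-- zeroing any cell never changes the shape of the board (the row replaced is the row read)
lemma shape_place (b : List (List Int)) (x y v : Int) :
    (pvPlace b x y v).map List.length = b.map List.length := by
  unfold pvPlace PySem.List.pySetD PySem.List.pySet? PySem.List.pyGetD PySem.List.pyGet?
  cases h : PySem.List.pyIdx? b.length x with
  | none => rfl
  | some k =>
    have hk : k < b.length := by
      unfold PySem.List.pyIdx? at h
      split_ifs at h <;> (injection h with h; omega)
    have hlen : ∀ (row : List Int) (o : Option Nat),
        ((Option.map (fun m => row.set m v) o).getD row).length = row.length := by
      intro row o; cases o <;> simp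
    simp only [Option.map_some, Option.getD_some, Option.bind_some, List.map_set,
      List.getElem?_eq_getElem hk, hlen]
    rw [← List.getElem_map List.length (l := b) (h := by simpa using hk), List.set_getElem_self]

lemma shape_fold (cells : List (Int × Int)) :
    ∀ (nb : List (List Int)),
      ((cells.foldl (fun bb c => pvPlace bb c.1 c.2 0) nb).map List.length) = nb.map List.length := by
  induction cells with
  | nil => intro nb; rfl
  | cons c t ih => intro nb; rw [List.foldl_cons, ih, shape_place]

lemma stepAB (opp : Int) (hopp : opp ≠ 0) (i j : Int) (sh : List Nat) :
    ∀ (nb : List (List Int)) (d : Int × Int), nb.map List.length = sh →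
      stepA i j opp nb d = stepB opp ((sh.length : Int)) ((sh.headD 0 : Int)) nb (i + d.1, j + d.2)
      ∧ (stepA i j opp nb d).map List.length = sh := by
  intro nb d hsh
  have hR : ((sh.length : Nat) : Int) = (nb.length : Int) := by rw [← hsh]; simp
  have hC : ((sh.headD 0 : Nat) : Int) = ((PySem.List.pyGetD nb 0 []).length : Int) := by
    rw [← hsh]; cases nb <;> simp [PySem.List.pyGetD_zero]
  have hflood := flood_eq nb opp hopp (pvFuel nb) [(i + d.1, j + d.2)]
    PySem.Set.empty [] PySem.Set.empty
  have hfalse : (!(PySem.Set.empty : PySem.Set (Int × Int)).isEmpty) = false := rfl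
  rw [hfalse] at hflood
  have hB : stepB opp ((sh.length : Int)) ((sh.headD 0 : Int)) nb (i + d.1, j + d.2) =
      (if 0 ≤ i + d.1 ∧ i + d.1 < (nb.length : Int) ∧ 0 ≤ j + d.2 ∧
          j + d.2 < ((PySem.List.pyGetD nb 0 []).length : Int) then
        if pvGet nb (i + d.1) (j + d.2) = opp then
          if (clLoop nb opp (pvFuel nb) [(i + d.1, j + d.2)] PySem.Set.empty PySem.Set.empty).isEmpty then
            (gLoop nb opp (pvFuel nb) [(i + d.1, j + d.2)] PySem.Set.empty []).foldl
              (fun bb c => pvPlace bb c.1 c.2 0) nb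
          else nb
        else nb
      else nb) := by
    unfold stepB
    rw [hR, hC]
    simp only [hflood]
    cases hemp : (clLoop nb opp (pvFuel nb) [(i + d.1, j + d.2)] PySem.Set.empty PySem.Set.empty).isEmpty <;>
      simp
  have hA : stepA i j opp nb d =
      (if 0 ≤ i + d.1 ∧ i + d.1 < (nb.length : Int) ∧ 0 ≤ j + d.2 ∧
          j + d.2 < ((PySem.List.pyGetD nb 0 []).length : Int) then
        if pvGet nb (i + d.1) (j + d.2) = opp then
          if (clLoop nb opp (pvFuel nb) [(i + d.1, j + d.2)] PySem.Set.empty PySem.Set.empty).isEmpty then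
            (gLoop nb opp (pvFuel nb) [(i + d.1, j + d.2)] PySem.Set.empty []).foldl
              (fun bb c => pvPlace bb c.1 c.2 0) nb
          else nb
        else nb
      else nb) := by
    unfold stepA get_group
    by_cases hget : pvGet nb (i + d.1) (j + d.2) = opp
    · have hcl : count_liberties nb (i + d.1) (j + d.2) opp =
          ((clLoop nb opp (pvFuel nb) [(i + d.1, j + d.2)] PySem.Set.empty PySem.Set.empty).length : Int) := by
        unfold count_liberties
        simp [hget]
      simp only [hcl]
      cases hemp : (clLoop nb opp (pvFuel nb) [(i + d.1, j + d.2)] PySem.Set.empty PySem.Set.empty).isEmpty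
      · have : ¬ ((clLoop nb opp (pvFuel nb) [(i + d.1, j + d.2)] PySem.Set.empty PySem.Set.empty).length : Int) = 0 := by
          simp only [List.isEmpty_eq_false_iff] at hemp
          simpa using fun hc => hemp (List.eq_nil_of_length_eq_zero hc)
        simp
        intro _ _ _ _ _ hnil
        exact absurd hnil (by simpa using hemp)
      · have he := List.isEmpty_iff.mp hemp
        rw [he]
        simp
    · simp [hget]
  refine ⟨hA.trans hB.symm, ?_⟩
  rw [hA]
  split_ifs <;> simp [shape_fold, hsh]

lemma outer_eq (opp : Int) (hopp : opp ≠ 0) (i j : Int) (sh : List Nat) :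
    ∀ (ds : List (Int × Int)) (nb : List (List Int)), nb.map List.length = sh →
      ds.foldl (stepA i j opp) nb =
        (ds.map (fun d => (i + d.1, j + d.2))).foldl (stepB opp (sh.length : Int) (sh.headD 0 : Int)) nb := by
  intro ds
  induction ds with
  | nil => intro nb _; rfl
  | cons d t ih =>
    intro nb hnb
    obtain ⟨h1, h2⟩ := stepAB opp hopp i j sh nb d hnb
    simp only [List.map_cons, List.foldl_cons, h1]
    exact ih _ (by rw [← h1, h2])

-- ===== VERDICT (by name: the statement is the Claim_ definition above) =====
theorem violates_ko_spec : Claim_equal_violates_ko := by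
  intro cur prev move player _ _
  unfold Spec_violates_ko violates_ko violates_ko_alt
  cases move with
  | none => rfl
  | some q =>
    obtain ⟨i, j⟩ := q
    simp only
    have hopp : (if player = 2 then (1 : Int) else 2) ≠ 0 := by split <;> decide
    set nb0 := pvPlace cur i j player with hnb0
    have hsh : nb0.map List.length = nb0.map List.length := rfl
    have hlen : ((nb0.map List.length).length : Int) = (nb0.length : Int) := by simp
    have hhead : ((nb0.map List.length).headD 0 : Int) = ((PySem.List.pyGetD nb0 0 []).length : Int) := by
      cases nb0 <;> simp [PySem.List.pyGetD_zero]
    have hmap : [(i - 1, j), (i + 1, j), (i, j + 1), (i, j - 1)] =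
        pvOuterDirs.map (fun d => (i + d.1, j + d.2)) := by
      norm_num [pvOuterDirs]
      omega
    rw [hmap, ← hlen, ← hhead,
      ← outer_eq (if player = 2 then (1 : Int) else 2) hopp i j (nb0.map List.length) pvOuterDirs nb0 hsh]
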